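-- pv_equiv track=rewrite | github.com/abdullah956/ai-proposals | src/agents/master_agent/agent.py | _expand_with_dependencies
-- ===== SOURCE A (Python) =====
-- from typing import Any, Dict, List, Optional
--
-- def _expand_with_dependencies(primary_agents: List[str]) -> List[str]:
--     """Expand agent list with dependencies."""
--     agent_dependencies = {
--         "scope_refinement": [],
--         "business_analyst": ["scope_refinement"],
--         "technical_architect": ["scope_refinement", "business_analyst"],
--         "project_manager": [
--             "scope_refinement",
--             "business_analyst",
--             "technical_architect",
--         ],
--         "resource_allocation": [
--             "scope_refinement",
--             "business_analyst",
--             "technical_architect",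
--             "project_manager",
--         ],
--     }
--
--     all_affected = set(primary_agents)
--     to_process = list(primary_agents)
--
--     while to_process:
--         current_agent = to_process.pop(0)
--         for agent_name, dependencies in agent_dependencies.items():
--             if current_agent in dependencies and agent_name not in all_affected:
--                 all_affected.add(agent_name)
--                 to_process.append(agent_name)
--
--     # Return in execution order
--     agent_order = [
--         "scope_refinement",
--         "business_analyst",
--         "technical_architect",
--         "project_manager",
--         "resource_allocation",
--     ]
--     ordered_agents = [a for a in agent_order if a in all_affected]
--     return ordered_agents
-- ===== SOURCE B (Python) =====
-- from typing import List
--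
-- def _expand_with_dependencies(primary_agents: List[str]) -> List[str]:
--     """Expand agent list with dependencies.
--
--     Each agent in the chain depends on all earlier ones, so the affected set
--     is always a suffix of the execution order: return the suffix starting at
--     the earliest primary agent found in the order (or [] if none is known).
--     """
--     agent_order = [
--         "scope_refinement",
--         "business_analyst",
--         "technical_architect",
--         "project_manager",
--         "resource_allocation",
--     ]
--     for i, agent in enumerate(agent_order):
--         if agent in primary_agents:
--             return agent_order[i:]
--     return []
-- ===== Notes on version B (the rewrite author's own statement) =====
-- stated objective: simpler
-- what changed: Replaces A's BFS over the reverse-dependency graph (while-loop with queue and visited set, then a filter pass) by the closed-form observation that in the hard-coded total dependency chain the affected set is always a suffix of agent_order: B returns the suffix starting at the first agent of agent_order found in primary_agents, and the empty list when none is found.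
import Mathlib
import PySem

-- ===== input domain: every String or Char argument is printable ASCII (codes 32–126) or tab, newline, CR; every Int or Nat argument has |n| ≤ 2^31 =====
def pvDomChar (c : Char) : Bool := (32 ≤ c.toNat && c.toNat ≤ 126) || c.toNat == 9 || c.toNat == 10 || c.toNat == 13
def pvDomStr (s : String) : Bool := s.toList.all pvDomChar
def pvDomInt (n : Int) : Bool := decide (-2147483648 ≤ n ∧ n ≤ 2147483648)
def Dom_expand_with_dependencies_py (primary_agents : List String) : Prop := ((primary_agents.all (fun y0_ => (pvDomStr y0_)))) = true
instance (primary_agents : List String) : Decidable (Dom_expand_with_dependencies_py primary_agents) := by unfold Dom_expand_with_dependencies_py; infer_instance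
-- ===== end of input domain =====

-- B replaces A's BFS over reverse dependencies by the closed-form observation that the
-- affected set is always a suffix of the fixed execution order (objective: simpler).

-- ===== PORT A =====
-- the hard-coded dependency dict, in insertion order
def depsA : List (String × List String) :=
  [("scope_refinement", []),
   ("business_analyst", ["scope_refinement"]),
   ("technical_architect", ["scope_refinement", "business_analyst"]),
   ("project_manager", ["scope_refinement", "business_analyst", "technical_architect"]),
   ("resource_allocation", ["scope_refinement", "business_analyst", "technical_architect", "project_manager"])]

-- the hard-coded agent_order list
def ordA : List String :=
  ["scope_refinement", "business_analyst", "technical_architect", "project_manager", "resource_allocation"]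

-- body of the inner `for agent_name, dependencies in agent_dependencies.items():`
def stepA (c : String) (st : PySem.Set String × List String) (p : String × List String) :
    PySem.Set String × List String :=
  if p.2.contains c && !(PySem.Set.contains st.1 p.1) then
    (PySem.Set.add st.1 p.1, st.2 ++ [p.1])
  else st

-- termination measure: queue length plus twice the number of the five agents missing from the set
def missA (a : List String) : Nat :=
  (if "scope_refinement" ∈ a then 0 else 1) + (if "business_analyst" ∈ a then 0 else 1) +
  (if "technical_architect" ∈ a then 0 else 1) + (if "project_manager" ∈ a then 0 else 1) +
  (if "resource_allocation" ∈ a then 0 else 1)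

theorem sum5_lt {t1 t2 t3 t4 t5 s1 s2 s3 s4 s5 : Nat}
    (h1 : t1 ≤ s1) (h2 : t2 ≤ s2) (h3 : t3 ≤ s3) (h4 : t4 ≤ s4) (h5 : t5 ≤ s5)
    (hs : t1 < s1 ∨ t2 < s2 ∨ t3 < s3 ∨ t4 < s4 ∨ t5 < s5) :
    t1 + t2 + t3 + t4 + t5 < s1 + s2 + s3 + s4 + s5 := by omega

theorem termA_le (a : List String) (x m : String) :
    (if m ∈ PySem.Set.add a x then (0 : Nat) else 1) ≤ (if m ∈ a then 0 else 1) := by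
  by_cases hm : m ∈ a
  · simp [PySem.Set.mem_add, hm]
  · simp only [hm, if_false]
    split <;> omega

theorem missA_add_lt (a : List String) (n : String) (hn : n ∈ ordA) (hna : n ∉ a) :
    missA (PySem.Set.add a n) < missA a := by
  have hs : (if n ∈ PySem.Set.add a n then (0 : Nat) else 1) < (if n ∈ a then 0 else 1) := by
    simp [PySem.Set.mem_add, hna]
  simp only [ordA, List.mem_cons, List.not_mem_nil, or_false] at hn
  simp only [missA]
  rcases hn with h | h | h | h | h <;> subst h <;>
    refine sum5_lt (termA_le a _ _) (termA_le a _ _) (termA_le a _ _) (termA_le a _ _)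
      (termA_le a _ _) ?_
  · exact Or.inl hs
  · exact Or.inr (Or.inl hs)
  · exact Or.inr (Or.inr (Or.inl hs))
  · exact Or.inr (Or.inr (Or.inr (Or.inl hs)))
  · exact Or.inr (Or.inr (Or.inr (Or.inr hs)))

theorem foldA_meas (c : String) (items : List (String × List String)) :
    ∀ (a : PySem.Set String) (q : List String), (∀ p ∈ items, p.1 ∈ ordA) →
    (items.foldl (stepA c) (a, q)).2.length + 2 * missA (items.foldl (stepA c) (a, q)).1
      ≤ q.length + 2 * missA a := by
  induction items with
  | nil => intro a q _; simp
  | cons p items ih =>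
    intro a q hmem
    simp only [List.foldl_cons]
    by_cases hc : p.2.contains c && !(PySem.Set.contains a p.1)
    · have hna : p.1 ∉ a := by
        rcases Bool.and_eq_true_iff.mp hc with ⟨_, h2⟩
        simpa [PySem.Set.contains_iff] using h2
      have hlt : missA (PySem.Set.add a p.1) < missA a :=
        missA_add_lt a p.1 (hmem p (List.mem_cons_self ..)) hna
      have := ih (PySem.Set.add a p.1) (q ++ [p.1])
        (fun x hx => hmem x (List.mem_cons_of_mem _ hx))
      simp only [stepA, hc, if_true] at *
      simp only [List.length_append, List.length_cons, List.length_nil] at this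
      omega
    · have := ih a q (fun x hx => hmem x (List.mem_cons_of_mem _ hx))
      have hif : stepA c (a, q) p = (a, q) := by
        unfold stepA; dsimp only; rw [if_neg hc]
      rw [hif]
      exact this

-- the `while to_process:` loop; the inner `for` is a fold over the dict items
def loopA (aff : PySem.Set String) (q : List String) : PySem.Set String :=
  match q with
  | [] => aff
  | c :: rest =>
    let st := depsA.foldl (stepA c) (aff, rest)
    loopA st.1 st.2
termination_by q.length + 2 * missA aff
decreasing_by
  have h := foldA_meas c depsA aff rest (by decide)
  simp only [List.length_cons]
  omega

-- port of A: _expand_with_dependencies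
def expand_with_dependencies_py (primary_agents : List String) : List String :=
  let all_affected := loopA (PySem.Set.ofList primary_agents) primary_agents
  ordA.filter (fun a => PySem.Set.contains all_affected a)

-- ===== PORT B =====
-- Source B's `for i, agent in enumerate(agent_order): if agent in primary_agents: return agent_order[i:]`
-- as structural recursion over agent_order (the remaining list IS agent_order[i:])
def suffB (p : List String) : List String → List String
  | [] => []
  | a :: rest => if a ∈ p then a :: rest else suffB p rest

def expand_with_dependencies_py_alt (primary_agents : List String) : List String :=
  suffB primary_agents
    ["scope_refinement", "business_analyst", "technical_architect", "project_manager", "resource_allocation"]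

-- ===== PRECONDITION & SPEC =====
def Spec_expand_with_dependencies_py (primary_agents : List String) (out : List String) : Prop := out = expand_with_dependencies_py_alt primary_agents
instance (primary_agents : List String) (out : List String) : Decidable (Spec_expand_with_dependencies_py primary_agents out) := by unfold Spec_expand_with_dependencies_py; infer_instance

-- ===== CLAIM (what is proved, stated in full; the proofs are below) =====
def Claim_equal_expand_with_dependencies_py : Prop := ∀ (primary_agents : List String), Dom_expand_with_dependencies_py primary_agents → Spec_expand_with_dependencies_py primary_agents (expand_with_dependencies_py primary_agents)

-- ===== LEMMAS AND PROOFS =====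

-- x is a (one-step) reverse dependency of c in A's hard-coded graph
def edgeA (c x : String) : Prop := ∃ p ∈ depsA, x = p.1 ∧ c ∈ p.2

theorem edgeA_trans {b c x : String} (h1 : edgeA b c) (h2 : edgeA c x) : edgeA b x := by
  simp only [edgeA, depsA, List.mem_cons, List.not_mem_nil, or_false] at *
  rcases h1 with ⟨p, hp, hc, hb⟩ <;> rcases h2 with ⟨p', hp', hx, hc'⟩ <;>
    rcases hp with h | h | h | h | h <;> subst h <;>
    rcases hp' with h | h | h | h | h <;> subst h <;>
    simp_all <;> aesop

-- membership in the state after the inner for-loop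
theorem foldA_mem (c : String) (items : List (String × List String)) :
    ∀ (a : PySem.Set String) (q : List String),
    (∀ x, x ∈ (items.foldl (stepA c) (a, q)).1 ↔ x ∈ a ∨ ∃ p ∈ items, x = p.1 ∧ c ∈ p.2)
    ∧ (∀ x, x ∈ (items.foldl (stepA c) (a, q)).2 ↔
        x ∈ q ∨ (x ∈ (items.foldl (stepA c) (a, q)).1 ∧ x ∉ a)) := by
  induction items with
  | nil => intro a q; simp
  | cons p items ih =>
    intro a q
    simp only [List.foldl_cons]
    by_cases hc : p.2.contains c && !(PySem.Set.contains a p.1)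
    · rcases Bool.and_eq_true_iff.mp hc with ⟨h1, h2⟩
      have hcd : c ∈ p.2 := by simpa using h1
      have hna : p.1 ∉ a := by simpa [PySem.Set.contains_iff] using h2
      simp only [stepA, hc, if_true]
      obtain ⟨ihm, ihq⟩ := ih (PySem.Set.add a p.1) (q ++ [p.1])
      constructor
      · intro x
        rw [ihm x]
        simp only [PySem.Set.mem_add, List.mem_cons]
        constructor
        · rintro (⟨h | h⟩ | h)
          · exact Or.inl h
          · exact Or.inr ⟨p, Or.inl rfl, h, hcd⟩
          · rcases h with ⟨p', hp', hx, hc'⟩; exact Or.inr ⟨p', Or.inr hp', hx, hc'⟩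
        · rintro (h | ⟨p', hp', hx, hc'⟩)
          · exact Or.inl (Or.inl h)
          · rcases hp' with hh | hh
            · subst hh; exact Or.inl (Or.inr hx)
            · exact Or.inr ⟨p', hh, hx, hc'⟩
      · intro x
        rw [ihq x, ihm x]
        simp only [List.mem_append, List.mem_singleton, PySem.Set.mem_add]
        by_cases hxp : x = p.1
        · subst hxp
          simp [hna, hcd]
        · simp [hxp]
    · have hif : stepA c (a, q) p = (a, q) := by
        unfold stepA; dsimp only; rw [if_neg hc]
      rw [hif]
      obtain ⟨ihm, ihq⟩ := ih a q
      have hcase : ¬ (c ∈ p.2) ∨ p.1 ∈ a := by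
        rcases Bool.and_eq_true_iff.not.mp hc |> not_and_or.mp with h | h
        · left; simpa using h
        · right; simpa [PySem.Set.contains_iff] using h
      constructor
      · intro x
        rw [ihm x]
        constructor
        · rintro (h | ⟨p', hp', hx, hc'⟩)
          · exact Or.inl h
          · exact Or.inr ⟨p', List.mem_cons_of_mem _ hp', hx, hc'⟩
        · rintro (h | ⟨p', hp', hx, hc'⟩)
          · exact Or.inl h
          · rcases List.mem_cons.mp hp' with hh | hh
            · subst hh; subst hx
              rcases hcase with h | h
              · exact absurd hc' h
              · exact Or.inl h
            · exact Or.inr ⟨p', hh, hx, hc'⟩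
      · exact ihq

-- membership in A's affected set after the whole while-loop
theorem loopA_mem (aff : PySem.Set String) (q : List String) (x : String) :
    x ∈ loopA aff q ↔ x ∈ aff ∨ ∃ c ∈ q, edgeA c x := by
  induction aff, q using loopA.induct with
  | case1 aff => simp [loopA]
  | case2 aff c rest st ih =>
    rw [loopA]
    rw [ih]
    obtain ⟨hm, hq⟩ := foldA_mem c depsA aff rest
    rw [hm x]
    constructor
    · rintro ((h | h) | ⟨c', hc', he⟩)
      · exact Or.inl h
      · exact Or.inr ⟨c, List.mem_cons_self .., h⟩
      · rw [hq c'] at hc'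
        rcases hc' with h | ⟨h1, hnaff⟩
        · exact Or.inr ⟨c', List.mem_cons_of_mem _ h, he⟩
        · rw [hm c'] at h1
          rcases h1 with h1 | h1
          · exact absurd h1 hnaff
          · exact Or.inr ⟨c, List.mem_cons_self .., edgeA_trans h1 he⟩
    · rintro (h | ⟨c', hc', he⟩)
      · exact Or.inl (Or.inl h)
      · rcases List.mem_cons.mp hc' with hh | hh
        · subst hh; exact Or.inl (Or.inr he)
        · refine Or.inr ⟨c', ?_, he⟩
          rw [hq c', hm c']
          exact Or.inl hh

theorem expand_with_dependencies_py_spec : Claim_equal_expand_with_dependencies_py := by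
  intro p _
  unfold Spec_expand_with_dependencies_py
  have h0 : ("scope_refinement" ∈ loopA (PySem.Set.ofList p) p) ↔ "scope_refinement" ∈ p := by
    rw [loopA_mem]; simp [edgeA, depsA, PySem.Set.mem_ofList, and_or_left, exists_or]
  have h1 : ("business_analyst" ∈ loopA (PySem.Set.ofList p) p) ↔
      ("business_analyst" ∈ p ∨ "scope_refinement" ∈ p) := by
    rw [loopA_mem]; simp [edgeA, depsA, PySem.Set.mem_ofList, and_or_left, exists_or]
  have h2 : ("technical_architect" ∈ loopA (PySem.Set.ofList p) p) ↔
      ("technical_architect" ∈ p ∨ "scope_refinement" ∈ p ∨ "business_analyst" ∈ p) := by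
    rw [loopA_mem]; simp [edgeA, depsA, PySem.Set.mem_ofList, and_or_left, exists_or]
  have h3 : ("project_manager" ∈ loopA (PySem.Set.ofList p) p) ↔
      ("project_manager" ∈ p ∨ "scope_refinement" ∈ p ∨ "business_analyst" ∈ p ∨
       "technical_architect" ∈ p) := by
    rw [loopA_mem]; simp [edgeA, depsA, PySem.Set.mem_ofList, and_or_left, exists_or]
  have h4 : ("resource_allocation" ∈ loopA (PySem.Set.ofList p) p) ↔
      ("resource_allocation" ∈ p ∨ "scope_refinement" ∈ p ∨ "business_analyst" ∈ p ∨
       "technical_architect" ∈ p ∨ "project_manager" ∈ p) := by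
    rw [loopA_mem]; simp [edgeA, depsA, PySem.Set.mem_ofList, and_or_left, exists_or]
  show expand_with_dependencies_py p = expand_with_dependencies_py_alt p
  unfold expand_with_dependencies_py expand_with_dependencies_py_alt
  simp only [ordA, List.filter_cons, List.filter_nil, PySem.Set.contains_iff, h0, h1, h2, h3, h4]
  by_cases p0 : "scope_refinement" ∈ p <;> by_cases p1 : "business_analyst" ∈ p <;>
    by_cases p2 : "technical_architect" ∈ p <;> by_cases p3 : "project_manager" ∈ p <;>
    by_cases p4 : "resource_allocation" ∈ p <;>
    simp [suffB, p0, p1, p2, p3, p4]
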